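-- pv_equiv track=rewrite | github.com/facundoPri/algoritmo-programacion-i-essaya | guia_de_ejercicios/ej_6/ej6_3.py | reemplazar_digitos_caracter
-- ===== SOURCE A (Python) =====
-- def reemplazar_digitos_caracter(cadena, reemplazo, cantidad):
--     """
--     Recibe una cadena y un remplazo
--     Devuelve la cadena pero reemplazando los posibles digitos
--     """
--     resultado = ""
--     reemplazados = 0
--     for i in range(0, len(cadena)):
--         if reemplazados == cantidad:
--             return resultado + cadena[i:]
--         elif cadena[i].isdigit():
--             resultado += reemplazo
--             reemplazados += 1
--         else:
--             resultado += cadena[i]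
--     return resultado
-- ===== SOURCE B (Python) =====
-- def reemplazar_digitos_caracter(cadena, reemplazo, cantidad):
--     """Two-phase: gather digit positions, select the replaced ones, build output in one join."""
--     indices = [i for i, c in enumerate(cadena) if c.isdigit()]
--     chosen = set(indices) if cantidad < 0 else set(indices[:cantidad])
--     return ''.join(reemplazo if i in chosen else c for i, c in enumerate(cadena))
-- ===== Notes on version B (the rewrite author's own statement) =====
-- stated objective: alternative
-- what changed: A's single accumulate-and-early-return scan with a mutable counter is replaced by a two-phase decomposition: first compute the list of digit indices, select the chosen ones as a set (all for negative cantidad, the first cantidad otherwise), then build the output in one join over enumerate.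
import Mathlib
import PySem

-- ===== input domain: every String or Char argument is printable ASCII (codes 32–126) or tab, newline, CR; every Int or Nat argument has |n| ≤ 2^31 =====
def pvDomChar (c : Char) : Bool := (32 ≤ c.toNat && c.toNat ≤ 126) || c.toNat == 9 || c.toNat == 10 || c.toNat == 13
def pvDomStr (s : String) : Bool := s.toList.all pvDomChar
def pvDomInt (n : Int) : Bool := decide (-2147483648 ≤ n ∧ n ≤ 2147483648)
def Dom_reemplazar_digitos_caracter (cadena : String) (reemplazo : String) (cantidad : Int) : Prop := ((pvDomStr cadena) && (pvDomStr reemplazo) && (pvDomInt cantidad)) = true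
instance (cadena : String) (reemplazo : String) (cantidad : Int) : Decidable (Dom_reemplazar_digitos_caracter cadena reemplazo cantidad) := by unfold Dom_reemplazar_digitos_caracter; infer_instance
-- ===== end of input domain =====

-- B replaces A's accumulate-and-early-return scan by a two-phase decomposition
-- (gather digit indices, choose a set of them, rebuild in one pass); objective: alternative.


-- ===== PORT A =====
-- the for-loop: state = (remaining characters = cadena[i:], reemplazados, resultado)
def pvGoA (reemplazo : List Char) (cantidad : Int) : List Char → Int → List Char → List Char
  | [], _, res => res
  | c :: rest, reemplazados, res =>
    if reemplazados = cantidad then res ++ (c :: rest)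
    else if PySem.Chars.isdigit c then pvGoA reemplazo cantidad rest (reemplazados + 1) (res ++ reemplazo)
    else pvGoA reemplazo cantidad rest reemplazados (res ++ [c])

def reemplazar_digitos_caracter (cadena : String) (reemplazo : String) (cantidad : Int) : String :=
  String.mk (pvGoA reemplazo.toList cantidad cadena.toList 0 [])

-- ===== PORT B =====
-- indices = [i for i, c in enumerate(cadena) if c.isdigit()]  (s is enumerate's start, 0 here)
def pvIndicesB (cs : List Char) (s : Int) : List Int :=
  ((PySem.List.enumerate cs s).filter (fun p => PySem.Chars.isdigit p.2)).map (·.1)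

-- chosen = set(indices) if cantidad < 0 else set(indices[:cantidad])
def pvChosenB (cs : List Char) (s : Int) (cantidad : Int) : PySem.Set Int :=
  if cantidad < 0 then PySem.Set.ofList (pvIndicesB cs s)
  else PySem.Set.ofList (PySem.List.slice (pvIndicesB cs s) none (some cantidad))

def reemplazar_digitos_caracter_alt (cadena : String) (reemplazo : String) (cantidad : Int) : String :=
  String.mk ((PySem.List.enumerate cadena.toList 0).flatMap
    (fun p => if PySem.Set.contains (pvChosenB cadena.toList 0 cantidad) p.1
      then reemplazo.toList else [p.2]))

-- ===== PRECONDITION & SPEC =====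
def Spec_reemplazar_digitos_caracter (cadena : String) (reemplazo : String) (cantidad : Int) (out : String) : Prop := out = reemplazar_digitos_caracter_alt cadena reemplazo cantidad
instance (cadena : String) (reemplazo : String) (cantidad : Int) (out : String) : Decidable (Spec_reemplazar_digitos_caracter cadena reemplazo cantidad out) := by unfold Spec_reemplazar_digitos_caracter; infer_instance

-- ===== CLAIM (what is proved, stated in full; the proofs are below) =====
def Claim_equal_reemplazar_digitos_caracter : Prop := ∀ (cadena : String) (reemplazo : String) (cantidad : Int), Dom_reemplazar_digitos_caracter cadena reemplazo cantidad → Spec_reemplazar_digitos_caracter cadena reemplazo cantidad (reemplazar_digitos_caracter cadena reemplazo cantidad)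

-- ===== LEMMAS AND PROOFS =====

-- common denominator: replace each digit while the budget k is nonzero, decrementing it
def pvRep (reemplazo : List Char) : List Char → Int → List Char
  | [], _ => []
  | c :: rest, k =>
    if PySem.Chars.isdigit c ∧ k ≠ 0 then reemplazo ++ pvRep reemplazo rest (k - 1)
    else c :: pvRep reemplazo rest k

theorem pvRep_zero (r : List Char) (cs : List Char) : pvRep r cs 0 = cs := by
  induction cs with
  | nil => rfl
  | cons c rest ih => simp [pvRep, ih]

theorem pvGoA_eq (r : List Char) (cant : Int) (cs : List Char) :
    ∀ (m : Int) (res : List Char), pvGoA r cant cs m res = res ++ pvRep r cs (cant - m) := by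
  induction cs with
  | nil => intro m res; simp [pvGoA, pvRep]
  | cons c rest ih =>
    intro m res
    by_cases hm : m = cant
    · subst hm
      simp [pvGoA, pvRep, pvRep_zero]
    · by_cases hd : PySem.Chars.isdigit c
      · have h1 : cant - (m + 1) = cant - m - 1 := by ring
        simp [pvGoA, hm, hd, pvRep, ih, h1, sub_ne_zero.mpr (Ne.symm hm)]
      · simp [pvGoA, hm, hd, pvRep, ih, sub_ne_zero.mpr (Ne.symm hm)]

theorem mem_pvIndicesB (cs : List Char) (s i : Int) (h : i ∈ pvIndicesB cs s) : s ≤ i := by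
  simp only [pvIndicesB, List.mem_map, List.mem_filter] at h
  obtain ⟨p, ⟨hp, _⟩, hpi⟩ := h
  rw [PySem.List.mem_enumerate_iff] at hp
  obtain ⟨k, hk, rfl⟩ := hp
  omega

theorem pvIndicesB_cons (c : Char) (cs : List Char) (s : Int) :
    pvIndicesB (c :: cs) s =
      (if PySem.Chars.isdigit c then [s] else []) ++ pvIndicesB cs (s + 1) := by
  by_cases hd : PySem.Chars.isdigit c <;>
    simp [pvIndicesB, PySem.List.enumerate_cons, hd]

-- membership in the chosen set, as plain list membership (PySem.Set.contains is List.contains)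
theorem contains_chosen (cs : List Char) (s k i : Int) :
    PySem.Set.contains (pvChosenB cs s k) i =
      (if k < 0 then decide (i ∈ pvIndicesB cs s)
       else decide (i ∈ PySem.List.slice (pvIndicesB cs s) none (some k))) := by
  by_cases hk : k < 0 <;>
    simp [pvChosenB, PySem.Set.contains, hk, PySem.Set.mem_ofList]

-- the head index s is chosen iff c is a digit and the budget is nonzero
theorem chosen_head (c : Char) (cs : List Char) (s k : Int)
    (h : PySem.Set.contains (pvChosenB (c :: cs) s k) s = true) :
    PySem.Chars.isdigit c ∧ k ≠ 0 := by
  rw [contains_chosen, pvIndicesB_cons] at h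
  by_cases hd : PySem.Chars.isdigit c
  · refine ⟨hd, ?_⟩
    intro h0; subst h0
    rw [if_neg (by omega : ¬ (0:Int) < 0), PySem.List.slice_to _ le_rfl] at h
    simp at h
  · rw [if_neg hd, List.nil_append] at h
    by_cases hk : k < 0
    · rw [if_pos hk] at h
      simp only [decide_eq_true_eq] at h
      exact absurd (mem_pvIndicesB _ _ _ h) (by omega)
    · rw [if_neg hk, PySem.List.slice_to _ (by omega)] at h
      simp only [decide_eq_true_eq] at h
      exact absurd (mem_pvIndicesB _ _ _ (List.mem_of_mem_take h)) (by omega)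

theorem chosen_head' (c : Char) (cs : List Char) (s k : Int)
    (hd : PySem.Chars.isdigit c) (hk : k ≠ 0) :
    PySem.Set.contains (pvChosenB (c :: cs) s k) s = true := by
  rw [contains_chosen]
  by_cases hkn : k < 0 <;> simp [hkn, pvIndicesB_cons, hd]
  rw [PySem.List.slice_to _ (by omega)]
  have : k.toNat = (k.toNat - 1) + 1 := by omega
  rw [this, List.take_succ_cons]
  simp

-- a tail index (≥ s+1) is chosen in the full set iff it is chosen in the tail's own set,
-- with budget k-1 exactly when the head consumed a replacement
theorem chosen_tail (c : Char) (cs : List Char) (s k i : Int) (hi : s + 1 ≤ i) :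
    PySem.Set.contains (pvChosenB (c :: cs) s k) i =
      PySem.Set.contains
        (pvChosenB cs (s + 1) (if PySem.Chars.isdigit c ∧ k ≠ 0 then k - 1 else k)) i := by
  rw [contains_chosen, contains_chosen]
  by_cases hd : PySem.Chars.isdigit c
  · by_cases hk0 : k = 0
    · subst hk0
      simp [pvIndicesB_cons, hd, PySem.List.slice_to _ (le_refl (0:Int))]
    · by_cases hkn : k < 0
      · have : k - 1 < 0 := by omega
        simp [hkn, hd, hk0, this, pvIndicesB_cons]
        intro h; omega
      · have h1 : ¬ (k - 1 < 0) := by omega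
        simp only [hkn, if_false, hd, hk0, ne_eq, not_false_iff, and_self, if_true, h1]
        rw [PySem.List.slice_to _ (by omega), PySem.List.slice_to _ (by omega)]
        have : k.toNat = (k - 1).toNat + 1 := by omega
        rw [pvIndicesB_cons, this]
        simp [hd, List.take_succ_cons]
        intro h; omega
  · simp [hd, pvIndicesB_cons]

-- B's one-pass join equals the common denominator, for any start offset
theorem altJoin_eq (r : List Char) (cs : List Char) :
    ∀ (s k : Int),
      (PySem.List.enumerate cs s).flatMap
        (fun p => if PySem.Set.contains (pvChosenB cs s k) p.1 then r else [p.2]) =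
      pvRep r cs k := by
  induction cs with
  | nil => intro s k; simp [PySem.List.enumerate, pvRep]
  | cons c rest ih =>
    intro s k
    rw [PySem.List.enumerate_cons]
    simp only [List.flatMap_cons]
    have htail :
        (PySem.List.enumerate rest (s + 1)).flatMap
          (fun p => if PySem.Set.contains (pvChosenB (c :: rest) s k) p.1 then r else [p.2]) =
        pvRep r rest (if PySem.Chars.isdigit c ∧ k ≠ 0 then k - 1 else k) := by
      rw [List.flatMap_congr (g := fun p =>
        if PySem.Set.contains
            (pvChosenB rest (s + 1) (if PySem.Chars.isdigit c ∧ k ≠ 0 then k - 1 else k)) p.1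
          then r else [p.2])]
      · exact ih (s + 1) _
      · intro p hp
        rw [PySem.List.mem_enumerate_iff] at hp
        obtain ⟨j, hj, rfl⟩ := hp
        rw [chosen_tail c rest s k _ (by omega)]
    by_cases hrep : PySem.Chars.isdigit c ∧ k ≠ 0
    · rw [chosen_head' c rest s k hrep.1 hrep.2, if_pos rfl, htail, if_pos hrep,
        pvRep, if_pos hrep]
    · have hh : PySem.Set.contains (pvChosenB (c :: rest) s k) s = false := by
        by_contra h
        simp only [Bool.not_eq_false] at h
        exact hrep (chosen_head c rest s k h)
      rw [hh]
      simp only [Bool.false_eq_true, if_false, htail, if_neg hrep, List.singleton_append]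
      rw [pvRep, if_neg hrep]

-- ===== VERDICT (by name: the statement is the Claim_ definition above) =====
theorem reemplazar_digitos_caracter_spec : Claim_equal_reemplazar_digitos_caracter := by
  intro cadena reemplazo cantidad _
  unfold Spec_reemplazar_digitos_caracter reemplazar_digitos_caracter reemplazar_digitos_caracter_alt
  rw [pvGoA_eq, altJoin_eq]
  simp
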